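-- pv_equiv track=rewrite | github.com/paqui4ever/Algoritmos-y-Estructuras-de-Datos-I | Parciales Python/Parcial3.py | acomodar
-- ===== SOURCE A (Python) =====
-- def acomodar (s: list[str]) -> list[str]:
--     res: list[str] = []
--     for partido in s:
--         if partido == "UP":
--             res.append(partido)
--     for partido in s:
--         if partido == "LLA":
--             res.append(partido)
--     return res
-- ===== SOURCE B (Python) =====
-- def acomodar(s: list[str]) -> list[str]:
--     # Single pass over a single output list: each "UP" is inserted at a moving
--     # pivot index (after the UPs collected so far, before any LLA), each "LLA"
--     # is appended at the end.
--     res: list[str] = []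
--     nup = 0
--     for x in s:
--         if x == "UP":
--             res.insert(nup, x)
--             nup += 1
--         elif x == "LLA":
--             res.append(x)
--     return res
-- ===== Notes on version B (the rewrite author's own statement) =====
-- stated objective: alternative
-- what changed: Replaces A's two staged filter-and-append passes with one single pass that maintains a single output list and a pivot index, inserting each UP at the pivot and appending each LLA at the end.
import Mathlib
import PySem

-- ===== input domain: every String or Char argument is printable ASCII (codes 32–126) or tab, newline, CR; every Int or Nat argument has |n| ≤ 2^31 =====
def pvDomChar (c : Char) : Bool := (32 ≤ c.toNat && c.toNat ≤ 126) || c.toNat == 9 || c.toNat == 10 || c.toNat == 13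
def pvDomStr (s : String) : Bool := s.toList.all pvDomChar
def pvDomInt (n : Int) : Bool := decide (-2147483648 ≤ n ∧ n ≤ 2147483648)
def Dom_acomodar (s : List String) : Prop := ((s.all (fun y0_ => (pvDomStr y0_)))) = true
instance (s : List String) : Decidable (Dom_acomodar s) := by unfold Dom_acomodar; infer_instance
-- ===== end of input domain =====

-- B makes one pass over one output list with a pivot index (UP inserted at the pivot, LLA appended)
-- instead of A's two staged filter-and-append passes (objective: alternative).
-- ===== PORT A =====
def acomodar (s : List String) : List String :=
  let res : List String := []
  let res := s.foldl (fun res partido => if partido == "UP" then res ++ [partido] else res) res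
  let res := s.foldl (fun res partido => if partido == "LLA" then res ++ [partido] else res) res
  res

-- ===== PORT B =====
def acomodar_alt (s : List String) : List String :=
  (s.foldl (fun (st : List String × Nat) x =>
      if x == "UP" then (PySem.List.insert st.1 (st.2 : Int) x, st.2 + 1)
      else if x == "LLA" then (st.1 ++ [x], st.2)
      else st) ([], 0)).1

-- ===== PRECONDITION & SPEC =====
def Spec_acomodar (s : List String) (out : List String) : Prop := out = acomodar_alt s
instance (s : List String) (out : List String) : Decidable (Spec_acomodar s out) := by unfold Spec_acomodar; infer_instance

-- ===== CLAIM (what is proved, stated in full; the proofs are below) =====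
def Claim_equal_acomodar : Prop := ∀ (s : List String), Dom_acomodar s → Spec_acomodar s (acomodar s)

-- ===== LEMMAS AND PROOFS =====

-- A's append-loop for the literal v, started from acc, appends the replicated matches of v
lemma foldl_append_eq_replicate (v : String) (s : List String) (acc : List String) :
    s.foldl (fun res partido => if partido == v then res ++ [partido] else res) acc
      = acc ++ List.replicate (s.count v) v := by
  induction s generalizing acc with
  | nil => simp
  | cons x xs ih =>
    by_cases h : x = v
    · subst h
      rw [List.foldl_cons, if_pos (by simp), ih]
      simp [List.count_cons_self, List.replicate_succ]
    · rw [List.foldl_cons, if_neg (by simp [h]), ih]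
      simp [h]

-- inserting "UP" at the pivot of a (UPs ++ LLAs) list grows the UP block
lemma insert_pivot (u l : Nat) :
    PySem.List.insert (List.replicate u "UP" ++ List.replicate l "LLA") (u : Int) "UP"
      = List.replicate (u + 1) "UP" ++ List.replicate l "LLA" := by
  rw [PySem.List.insert_natCast _ u _ (by simp)]
  have ht : (List.replicate u "UP" ++ List.replicate l "LLA").take u = List.replicate u "UP" := by
    rw [List.take_append_of_le_length (by simp)]; simp
  have hd : (List.replicate u "UP" ++ List.replicate l "LLA").drop u = List.replicate l "LLA" := by
    rw [List.drop_append_of_le_length (by simp)]; simp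
  rw [ht, hd, List.replicate_add]
  simp [List.replicate_succ]

-- invariant of B's single pass
lemma bloop (s : List String) (u l : Nat) :
    s.foldl (fun (st : List String × Nat) x =>
      if x == "UP" then (PySem.List.insert st.1 (st.2 : Int) x, st.2 + 1)
      else if x == "LLA" then (st.1 ++ [x], st.2)
      else st) (List.replicate u "UP" ++ List.replicate l "LLA", u)
      = (List.replicate (u + s.count "UP") "UP" ++ List.replicate (l + s.count "LLA") "LLA",
         u + s.count "UP") := by
  induction s generalizing u l with
  | nil => simp
  | cons x xs ih =>
    by_cases hu : x = "UP"
    · subst hu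
      rw [List.foldl_cons, if_pos (by simp), insert_pivot, ih]
      simp; omega
    · by_cases hl : x = "LLA"
      · subst hl
        rw [List.foldl_cons, if_neg (by simp), if_pos (by simp)]
        have : List.replicate u "UP" ++ List.replicate l "LLA" ++ ["LLA"]
            = List.replicate u "UP" ++ List.replicate (l + 1) "LLA" := by
          simp [List.replicate_add]
        rw [this, ih]
        simp
        omega
      · rw [List.foldl_cons, if_neg (by simp [hu]), if_neg (by simp [hl]), ih]
        simp [hu, hl]

-- ===== VERDICT (by name: the statement is the Claim_ definition above) =====
theorem acomodar_spec : Claim_equal_acomodar := by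
  intro s _
  unfold Spec_acomodar acomodar acomodar_alt
  have hB := bloop s 0 0
  simp only [List.replicate_zero, List.nil_append, Nat.zero_add] at hB
  rw [hB,
    show (have res : List String := [];
      have res := List.foldl (fun res partido => if (partido == "UP") = true then res ++ [partido] else res) res s;
      have res := List.foldl (fun res partido => if (partido == "LLA") = true then res ++ [partido] else res) res s;
      res)
      = List.foldl (fun res partido => if (partido == "LLA") = true then res ++ [partido] else res)
          (List.foldl (fun res partido => if (partido == "UP") = true then res ++ [partido] else res) [] s) s from rfl,
    foldl_append_eq_replicate, foldl_append_eq_replicate]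
  simp
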